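-- pv_equiv track=rewrite | github.com/guillaume-desbarbieux/AdventOfCode2023_Python | Year2023/Day11/day11.py | extend_cols
-- ===== SOURCE A (Python) =====
-- def extend_cols(sky, cols):
--     extended_sky = []
--     for i in range(len(sky)):
--         extended_sky.append([])
--
--     for j in range(len(sky[0])-1, -1, -1):
--         for i in range(len(sky)):
--             extended_sky[i].append(sky[i][j])
--             if j in cols:
--                 extended_sky[i].append(sky[i][j])
--     return extended_sky
-- ===== SOURCE B (Python) =====
-- def extend_cols(sky, cols):
--     width = len(sky[0])
--     dup = set(cols)
--     # transpose: build the grid's columns once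
--     columns = [[row[j] for row in sky] for j in range(width)]
--     # rebuild the column list right-to-left, repeating duplicated columns
--     new_cols = []
--     for j in range(width - 1, -1, -1):
--         new_cols.append(columns[j])
--         if j in dup:
--             new_cols.append(columns[j])
--     # transpose back to rows
--     return [[col[i] for col in new_cols] for i in range(len(sky))]
-- ===== Notes on version B (the rewrite author's own statement) =====
-- stated objective: faster
-- what changed: A fills preallocated output rows column-major, appending cell by cell into extended_sky[i] with an O(|cols|) list membership test per cell; B transposes the grid into a list of columns once, rebuilds the column list right-to-left duplicating marked columns wholesale (set membership), and transposes back to rows.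
import Mathlib
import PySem

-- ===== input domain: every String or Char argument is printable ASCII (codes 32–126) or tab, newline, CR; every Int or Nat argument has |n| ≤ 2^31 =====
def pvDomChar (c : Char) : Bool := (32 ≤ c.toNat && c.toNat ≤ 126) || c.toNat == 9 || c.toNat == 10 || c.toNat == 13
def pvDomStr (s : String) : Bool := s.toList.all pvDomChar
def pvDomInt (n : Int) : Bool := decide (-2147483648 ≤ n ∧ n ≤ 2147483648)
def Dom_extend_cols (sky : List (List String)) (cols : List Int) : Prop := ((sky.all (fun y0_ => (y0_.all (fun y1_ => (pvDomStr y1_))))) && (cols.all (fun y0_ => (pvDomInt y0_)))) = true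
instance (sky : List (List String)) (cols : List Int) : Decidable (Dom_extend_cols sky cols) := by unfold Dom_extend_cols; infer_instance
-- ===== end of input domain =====

-- B transposes the grid into columns, duplicates the marked columns wholesale while rebuilding
-- the column list right-to-left, and transposes back — instead of A's column-major cell-by-cell
-- fill of preallocated rows with a per-cell O(|cols|) list membership test (measured faster).

-- ===== PORT A =====
def extend_cols (sky : List (List String)) (cols : List Int) : List (List String) :=
  let extended0 : List (List String) :=
    (List.range sky.length).foldl (fun acc _ => acc ++ [[]]) []
  (PySem.List.pyRange ((((sky.headD []).length : Nat) : Int) - 1) (-1) (-1)).foldl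
    (fun acc j =>
      (List.range sky.length).foldl
        (fun acc2 i =>
          acc2.modify i (fun r =>
            let r' := r ++ [((PySem.List.pyGet? (sky.getD i []) j).getD "")]
            if cols.contains j then r' ++ [((PySem.List.pyGet? (sky.getD i []) j).getD "")] else r'))
        acc)
    extended0

-- ===== PORT B =====
def extend_cols_alt (sky : List (List String)) (cols : List Int) : List (List String) :=
  let width := (sky.headD []).length
  let dup : PySem.Set Int := PySem.Set.ofList cols
  let columns : List (List String) :=
    (List.range width).map (fun (j : Nat) => sky.map (fun row => (PySem.List.pyGet? row ((j : Nat) : Int)).getD ""))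
  let newCols : List (List String) :=
    (PySem.List.pyRange ((width : Int) - 1) (-1) (-1)).foldl
      (fun acc j =>
        let acc' := acc ++ [(PySem.List.pyGet? columns j).getD []]
        if (j ∈ dup) then acc' ++ [(PySem.List.pyGet? columns j).getD []] else acc')
      []
  (List.range sky.length).map (fun (i : Nat) =>
    newCols.map (fun col => (PySem.List.pyGet? col ((i : Nat) : Int)).getD ""))

-- ===== PRECONDITION & SPEC =====
-- Pre_ excludes exactly the inputs where the Python A raises IndexError: empty sky (sky[0]) and
-- rows shorter than the first row (sky[i][j]).  B raises identically there.
def Pre_extend_cols (sky : List (List String)) (cols : List Int) : Prop :=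
  sky ≠ [] ∧ ∀ row ∈ sky, (sky.headD []).length ≤ row.length
instance (sky : List (List String)) (cols : List Int) : Decidable (Pre_extend_cols sky cols) := by unfold Pre_extend_cols; infer_instance
def pvWitness_extend_cols : List (List String) × List Int := ([["#", ".", "."], ["a", "b", "c"]], [1])

def Spec_extend_cols (sky : List (List String)) (cols : List Int) (out : List (List String)) : Prop := out = extend_cols_alt sky cols
instance (sky : List (List String)) (cols : List Int) (out : List (List String)) : Decidable (Spec_extend_cols sky cols out) := by unfold Spec_extend_cols; infer_instance

-- ===== CLAIM (what is proved, stated in full; the proofs are below) =====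
def Claim_equal_extend_cols : Prop := ∀ (sky : List (List String)) (cols : List Int), Dom_extend_cols sky cols → Pre_extend_cols sky cols → Spec_extend_cols sky cols (extend_cols sky cols)

-- ===== LEMMAS AND PROOFS =====

-- A's preallocation loop appends len(sky) empty rows.
lemma pv_rep_init (n : Nat) (acc : List (List String)) :
    (List.range n).foldl (fun a _ => a ++ [([] : List String)]) acc
      = acc ++ List.replicate n ([] : List String) := by
  induction n with
  | zero => simp
  | succ m ih => simp [List.range_succ, List.foldl_append, ih, List.replicate_succ']

-- a fold of modify over range n touches each index once, independently
lemma pv_fold_modify (G : Nat → List String → List String) :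
    ∀ (n : Nat) (acc : List (List String)),
      (List.range n).foldl (fun a i => a.modify i (G i)) acc
        = acc.mapIdx (fun i r => if i < n then G i r else r) := by
  intro n
  induction n with
  | zero =>
    intro acc
    simp only [List.range_zero, List.foldl_nil, Nat.not_lt_zero, if_false]
    apply List.ext_getElem
    · simp
    · intro i h1 h2
      simp [List.getElem_mapIdx]
  | succ m ih =>
    intro acc
    rw [List.range_succ, List.foldl_append]
    simp only [List.foldl_cons, List.foldl_nil, ih]
    apply List.ext_getElem
    · simp
    · intro i h1 h2
      simp only [List.getElem_modify, List.getElem_mapIdx]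
      have hi : i < acc.length := by simpa using h2
      by_cases hm : m = i
      · subst hm; simp
      · have : ¬ i = m := fun h => hm h.symm
        split_ifs with h3 h4 h5 <;> try rfl
        · omega
        · omega

-- the mapIdx produced by pv_fold_modify over a mapped list is a row-wise map
lemma pv_mapIdx_map_rows (f : List String → List String)
    (h : List String → List String → List String) (sky : List (List String)) :
    (sky.map f).mapIdx (fun i r => if i < sky.length then h (sky.getD i []) r else r)
      = sky.map (fun row => h row (f row)) := by
  apply List.ext_getElem
  · simp
  · intro i h1 h2
    have hi : i < sky.length := by simpa using h1
    simp [List.getElem_mapIdx, hi, List.getD_eq_getElem?_getD]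

-- A's whole double loop, starting from one empty row per sky row, is a per-row fold
lemma pv_outer (S : List String → Int → List String → List String) (sky : List (List String)) :
    ∀ (js : List Int) (f : List String → List String),
      js.foldl
        (fun acc j =>
          (List.range sky.length).foldl
            (fun a i => a.modify i (fun r => S (sky.getD i []) j r)) acc)
        (sky.map f)
      = sky.map (fun row => js.foldl (fun r j => S row j r) (f row)) := by
  intro js
  induction js with
  | nil => intro f; simp
  | cons j js ih =>
    intro f
    simp only [List.foldl_cons]
    rw [pv_fold_modify (fun i r => S (sky.getD i []) j r) sky.length (sky.map f),
      pv_mapIdx_map_rows f (fun row r => S row j r) sky,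
      ih (fun row => S row j (f row))]

-- range(w-1, -1, -1) is the reversed range of naturals, cast to Int
lemma pv_range_countdown (w : Nat) :
    PySem.List.pyRange ((w : Int) - 1) (-1) (-1)
      = ((List.range w).reverse).map (fun (k : Nat) => (k : Int)) := by
  induction w with
  | zero => simp [PySem.List.pyRange_neg_one_eq_nil]
  | succ m ih =>
    have hcast : ((m + 1 : Nat) : Int) - 1 = (m : Int) := by push_cast; ring
    rw [hcast, PySem.List.pyRange_neg_one_cons (by exact lt_of_lt_of_le (by norm_num) (Int.natCast_nonneg m))]
    simp [List.range_succ, ih]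

-- B's two appends per column are one append of a one-or-two element block
lemma pv_b_body (C : List (List String)) (D : PySem.Set Int) :
    (fun (acc : List (List String)) (j : Int) =>
      let acc' := acc ++ [(PySem.List.pyGet? C j).getD []]
      if (j ∈ D) then acc' ++ [(PySem.List.pyGet? C j).getD []] else acc')
    = (fun acc j => acc ++
        (if (j ∈ D) then [(PySem.List.pyGet? C j).getD [], (PySem.List.pyGet? C j).getD []]
         else [(PySem.List.pyGet? C j).getD []])) := by
  funext acc j; by_cases h : j ∈ D <;> simp [h]

-- ===== VERDICT (by name: the statement is the Claim_ definition above) =====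
theorem extend_cols_spec : Claim_equal_extend_cols := by
  intro sky cols _ _
  unfold Spec_extend_cols extend_cols extend_cols_alt
  -- A side: one fold per row
  have hinit : (List.range sky.length).foldl (fun acc _ => acc ++ [([] : List String)]) []
      = sky.map (fun _ => ([] : List String)) := by
    rw [pv_rep_init]; simp [List.map_const']
  rw [hinit,
    pv_outer (fun row j r =>
      let r' := r ++ [((PySem.List.pyGet? row j).getD "")]
      if cols.contains j then r' ++ [((PySem.List.pyGet? row j).getD "")] else r') sky]
  have hAbody : ∀ row : List String,
      (fun (r : List String) (j : Int) =>
        let r' := r ++ [((PySem.List.pyGet? row j).getD "")]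
        if cols.contains j then r' ++ [((PySem.List.pyGet? row j).getD "")] else r')
      = (fun (r : List String) (j : Int) => r ++
          (if cols.contains j then
            [((PySem.List.pyGet? row j).getD ""), ((PySem.List.pyGet? row j).getD "")]
          else [((PySem.List.pyGet? row j).getD "")])) := by
    intro row; funext r j; by_cases hm : j ∈ cols <;> simp [hm]
  apply List.ext_getElem
  · simp
  · intro i h1 h2
    have hi : i < sky.length := by simpa using h1
    rw [List.getElem_map, List.getElem_map, List.getElem_range]
    simp only [pv_range_countdown]
    rw [hAbody (sky[i]), pv_b_body _ (PySem.Set.ofList cols),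
      PySem.List.foldl_append_eq_flatMap, PySem.List.foldl_append_eq_flatMap,
      List.nil_append, List.nil_append, List.map_flatMap,
      List.flatMap_map, List.flatMap_map]
    apply List.flatMap_congr
    intro k hk
    have hkw : k < (sky.headD []).length := by simpa using (List.mem_reverse.mp hk)
    have hkw2 : k < (sky.head?.getD []).length := by simpa using hkw
    by_cases hm : ((k : Nat) : Int) ∈ cols <;>
      simp [hm, PySem.Set.mem_ofList, List.getElem?_range hkw2,
        List.getElem?_map, List.getElem?_eq_getElem hi]
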